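-- pv_equiv track=rewrite | github.com/VT-NLP/open_domain_entity_state_tracking | 2_KIEST_constraint/training/utils.py | generate_mask_matrix
-- ===== SOURCE A (Python) =====
-- def generate_mask_matrix(points, triples):
--     weights = []
--     for i in range(len(points)):
--
--         weight1 = []
--         for j in range(len(points)):
--             if points[i].split("|")[1] == points[j].split("|")[0]:
--                 if points[i] + "|" + points[j].split("|")[1] in triples:
--                     weight1.append(1)
--                 else:
--                     weight1.append(0)
--
--             else:
--                 weight1.append(0)
--         weights.append(weight1)
--     return weights
-- ===== SOURCE B (Python) =====
-- def generate_mask_matrix(points, triples):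
--     n = len(points)
--     buckets = {}
--     for j, p in enumerate(points):
--         buckets.setdefault(p.split("|")[0], []).append(j)
--     triple_set = set(triples)
--     result = [[0] * n for _ in range(n)]
--     for i, p in enumerate(points):
--         tail = p.split("|")[1]
--         for j in buckets.get(tail, ()):
--             if p + "|" + points[j].split("|")[1] in triple_set:
--                 result[i][j] = 1
--     return result
-- ===== Notes on version B (the rewrite author's own statement) =====
-- stated objective: alternative
-- what changed: B replaces A's inner full scan of points per row by a dict bucketing indices by each point's head (split('|')[0]), a set of triples for the membership test, and writes 1s into a pre-allocated zero matrix, so only actual head/tail matches are visited.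
import Mathlib
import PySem

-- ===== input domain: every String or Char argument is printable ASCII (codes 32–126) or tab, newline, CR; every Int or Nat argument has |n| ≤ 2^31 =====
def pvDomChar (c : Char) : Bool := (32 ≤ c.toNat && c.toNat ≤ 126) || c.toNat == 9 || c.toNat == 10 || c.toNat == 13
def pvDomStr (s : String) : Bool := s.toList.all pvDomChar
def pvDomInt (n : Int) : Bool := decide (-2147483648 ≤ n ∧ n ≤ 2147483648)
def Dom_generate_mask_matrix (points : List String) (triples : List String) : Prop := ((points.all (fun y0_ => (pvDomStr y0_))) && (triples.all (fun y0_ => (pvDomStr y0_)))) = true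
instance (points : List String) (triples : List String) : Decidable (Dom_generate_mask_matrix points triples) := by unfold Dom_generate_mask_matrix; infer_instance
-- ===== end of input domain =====

-- B replaces A's per-row full scan of points by a head-indexed bucket dictionary plus a set of
-- triples, writing 1s into a pre-allocated zero matrix (objective: alternative algorithm).

-- shared helper: p.split("|") (sep "|" ≠ "", so split? is always some; exact)
def pvSplit (s : String) : List String := (PySem.Str.split? s "|").getD []

-- ===== PORT A =====
def generate_mask_matrix (points : List String) (triples : List String) : List (List Int) :=
  (PySem.List.pyRange 0 (PySem.List.len points)).foldl (fun weights i =>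
    weights ++ [(PySem.List.pyRange 0 (PySem.List.len points)).foldl (fun w1 j =>
      if PySem.List.pyGetD (pvSplit (PySem.List.pyGetD points i "")) 1 ""
           == PySem.List.pyGetD (pvSplit (PySem.List.pyGetD points j "")) 0 "" then
        if triples.contains (PySem.List.pyGetD points i "" ++ "|"
             ++ PySem.List.pyGetD (pvSplit (PySem.List.pyGetD points j "")) 1 "") then
          w1 ++ [(1 : Int)]
        else
          w1 ++ [(0 : Int)]
      else
        w1 ++ [(0 : Int)]) []]) []

-- ===== PORT B =====
def generate_mask_matrix_alt (points : List String) (triples : List String) : List (List Int) :=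
  let n := points.length
  -- buckets: head -> list of indices (setdefault(h, []).append(j) = modify h [] (· ++ [j]))
  let buckets : PySem.Dict String (List Int) :=
    (PySem.List.enumerate points).foldl (fun d jp =>
      d.modify (PySem.List.pyGetD (pvSplit jp.2) 0 "") [] (· ++ [jp.1])) PySem.Dict.empty
  let tset := PySem.Set.ofList triples
  let init := List.replicate n (List.replicate n (0 : Int))
  (PySem.List.enumerate points).foldl (fun res ip =>
    (buckets.getD (PySem.List.pyGetD (pvSplit ip.2) 1 "") []).foldl (fun res j =>
      if tset.contains (ip.2 ++ "|" ++ PySem.List.pyGetD (pvSplit (PySem.List.pyGetD points j "")) 1 "")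
      then PySem.List.pySetD res ip.1 (PySem.List.pySetD (PySem.List.pyGetD res ip.1 []) j (1 : Int))
      else res) res) init

-- ===== PRECONDITION & SPEC =====
-- Pre_ excludes exactly the inputs where Python A raises IndexError: a nonempty points list
-- containing a string without "|" (split("|")[1] fails for it).
def Pre_generate_mask_matrix (points : List String) (triples : List String) : Prop :=
  ∀ p ∈ points, 2 ≤ (pvSplit p).length
instance (points : List String) (triples : List String) : Decidable (Pre_generate_mask_matrix points triples) := by unfold Pre_generate_mask_matrix; infer_instance

def pvWitness_generate_mask_matrix : List String × List String := (["a|b", "b|c"], ["a|b|c"])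

def Spec_generate_mask_matrix (points : List String) (triples : List String) (out : List (List Int)) : Prop := out = generate_mask_matrix_alt points triples
instance (points : List String) (triples : List String) (out : List (List Int)) : Decidable (Spec_generate_mask_matrix points triples out) := by unfold Spec_generate_mask_matrix; infer_instance

-- ===== CLAIM (what is proved, stated in full; the proofs are below) =====
def Claim_equal_generate_mask_matrix : Prop := ∀ (points : List String) (triples : List String), Dom_generate_mask_matrix points triples → Pre_generate_mask_matrix points triples → Spec_generate_mask_matrix points triples (generate_mask_matrix points triples)

-- ===== LEMMAS AND PROOFS =====

lemma pySetD_natCast (xs : List (List Int)) (n : Nat) (v : List Int) (h : n < xs.length) :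
    PySem.List.pySetD xs (n : Int) v = xs.set n v := by
  simp [PySem.List.pySetD, PySem.List.pySet?_natCast _ _ _ h]

lemma pySetD_natCast' (xs : List Int) (n : Nat) (v : Int) (h : n < xs.length) :
    PySem.List.pySetD xs (n : Int) v = xs.set n v := by
  simp [PySem.List.pySetD, PySem.List.pySet?_natCast _ _ _ h]

lemma pyGetD_getElem (xs : List (List Int)) (n : Nat) (d : List Int) (h : n < xs.length) :
    PySem.List.pyGetD xs (n:Int) d = xs[n] := by
  simp [PySem.List.pyGetD_natCast, List.getElem?_eq_getElem h]

lemma rowF_length (c : Int → Bool) (bl : List Int) (row : List Int) :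
    (bl.foldl (fun row j => if c j then row.set j.toNat 1 else row) row).length = row.length := by
  induction bl generalizing row with
  | nil => rfl
  | cons j js ih => simp only [List.foldl_cons]; split <;> simp [ih]

lemma step_eq (c : Int → Bool) (bl : List Int) (res : List (List Int)) (i : Nat)
    (hi : i < res.length)
    (hbl : ∀ j ∈ bl, ∃ m : Nat, j = (m : Int) ∧ m < res[i].length) :
    bl.foldl (fun res j => if c j then
        PySem.List.pySetD res (i : Int) (PySem.List.pySetD (PySem.List.pyGetD res (i : Int) []) j 1)
      else res) res
    = res.set i (bl.foldl (fun row j => if c j then row.set j.toNat 1 else row) res[i]) := by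
  induction bl generalizing res with
  | nil => simp [List.set_getElem_self]
  | cons j js ih =>
    simp only [List.foldl_cons]
    obtain ⟨m, rfl, hm⟩ := hbl j (List.mem_cons_self)
    by_cases hc : c (m : Int)
    · simp only [hc, if_pos]
      rw [pyGetD_getElem _ _ _ hi, pySetD_natCast' _ _ _ hm, pySetD_natCast _ _ _ hi]
      have hlen : (res.set i (res[i].set m 1)).length = res.length := by simp
      rw [ih (res.set i (res[i].set m 1)) (by simpa using hi)
            (by intro j hj
                obtain ⟨m', rfl, hm'⟩ := hbl j (List.mem_cons_of_mem _ hj)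
                exact ⟨m', rfl, by simpa using hm'⟩)]
      rw [List.set_set]
      congr 1
      · rw [List.getElem_set_self]
        simp [Int.toNat_natCast]
    · simp only [hc, if_neg, Bool.false_eq_true, not_false_iff]
      exact ih res hi (fun j hj => hbl j (List.mem_cons_of_mem _ hj))

lemma outer_eq (B : String → List Int) (C : String → Int → Bool)
    (l : List String) (s : Nat) (res : List (List Int)) (n : Nat)
    (hres : res.length = n)
    (hrows : ∀ k, k < n → (res.getD k []).length = n)
    (hsl : s + l.length ≤ n)
    (hB : ∀ p j, j ∈ B p → ∃ m : Nat, j = (m : Int) ∧ m < n) :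
    (PySem.List.enumerate l (s : Int)).foldl (fun res ip =>
        (B ip.2).foldl (fun res j => if C ip.2 j then
            PySem.List.pySetD res ip.1 (PySem.List.pySetD (PySem.List.pyGetD res ip.1 []) j 1)
          else res) res) res
    = res.mapIdx (fun k row => if s ≤ k ∧ k - s < l.length then
        (B (l.getD (k - s) "")).foldl (fun row j => if C (l.getD (k - s) "") j then row.set j.toNat 1 else row) row
      else row) := by
  induction l generalizing s res with
  | nil =>
    simp only [PySem.List.enumerate_nil, List.foldl_nil, List.length_nil]
    apply List.ext_getElem <;> simp
  | cons p l ih =>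
    rw [PySem.List.enumerate_cons]
    simp only [List.foldl_cons]
    have hs : s < res.length := by rw [hres]; simp at hsl; omega
    have hrs : (res.getD s []).length = n := hrows s (by omega)
    have hget : res.getD s [] = res[s] := List.getD_eq_getElem _ _ hs
    rw [step_eq (C p) (B p) res s hs
          (by intro j hj; obtain ⟨m, rfl, hm⟩ := hB p j hj
              exact ⟨m, rfl, by rw [← hget, hrs]; omega⟩)]
    have hcast : ((s : Int) + 1) = ((s + 1 : Nat) : Int) := by push_cast; ring
    rw [hcast, ih (s + 1) (res.set s _) (by simp [hres])
          (by intro k hk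
              by_cases hks : k = s
              · subst hks
                rw [List.getD_eq_getElem _ _ (by simp [hres]; omega), List.getElem_set_self]
                rw [rowF_length, ← hget]; exact hrs
              · rw [List.getD_eq_getElem _ _ (by simp [hres]; omega),
                    List.getElem_set_ne (by omega) _, ← List.getD_eq_getElem _ _ (by simp [hres]; omega)]
                exact hrows k hk)
          (by simp at hsl; omega)]
    apply List.ext_getElem
    · simp
    · intro k hk1 hk2
      simp only [List.getElem_mapIdx]
      rw [List.getElem_set]
      by_cases hks : s = k
      · subst hks
        have h1 : ¬ (s + 1 ≤ s ∧ s - (s+1) < l.length) := by omega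
        have h2 : (s ≤ s ∧ s - s < (p :: l).length) := by simp
        simp only [if_pos h2, if_neg h1]
        simp
      · simp only [if_neg hks]
        by_cases hr : s + 1 ≤ k ∧ k - (s + 1) < l.length
        · have hr' : s ≤ k ∧ k - s < (p :: l).length := by simp; omega
          have hgd : l.getD (k - (s+1)) "" = (p :: l).getD (k - s) "" := by
            have : k - s = (k - (s+1)) + 1 := by omega
            rw [this]; simp
          simp only [if_pos hr, if_pos hr', hgd]
        · have hr' : ¬ (s ≤ k ∧ k - s < (p :: l).length) := by simp at hr ⊢; omega
          simp only [if_neg hr, if_neg hr']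

lemma rowFold_getElem (c : Int → Bool) (bl : List Int) (row : List Int) (k : Nat)
    (hk : k < row.length) (hbl : ∀ j ∈ bl, 0 ≤ j) :
    (bl.foldl (fun row j => if c j then row.set j.toNat 1 else row) row)[k]'(by rw [rowF_length]; exact hk)
      = if ((k : Int) ∈ bl ∧ c (k : Int)) then 1 else row[k] := by
  induction bl generalizing row with
  | nil => simp
  | cons j js ih =>
    simp only [List.foldl_cons]
    by_cases hc : c j
    · simp only [hc, if_pos]
      rw [ih (row.set j.toNat 1) (by simpa using hk) (fun j hj => hbl j (List.mem_cons_of_mem _ hj))]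
      by_cases hjk : j = (k : Int)
      · subst hjk
        simp only [Int.toNat_natCast]
        rw [List.getElem_set_self]
        simp [hc]
      · have hne : j.toNat ≠ k := by
          have := hbl j List.mem_cons_self
          omega
        rw [List.getElem_set_ne hne]
        by_cases hm : (k : Int) ∈ js <;> simp [hm, Ne.symm hjk]
    · simp only [hc, Bool.false_eq_true, if_neg, not_false_iff]
      rw [ih row hk (fun j hj => hbl j (List.mem_cons_of_mem _ hj))]
      by_cases hjk : (k : Int) = j
      · subst hjk
        simp [hc]
      · simp [hjk]


lemma bucket_spec (f : String → String) (l : List (Int × String)) (d : PySem.Dict String (List Int)) (t : String) :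
    (l.foldl (fun d jp => d.modify (f jp.2) [] (· ++ [jp.1])) d).getD t []
      = d.getD t [] ++ (l.filter (fun jp => f jp.2 == t)).map (·.1) := by
  induction l generalizing d with
  | nil => simp
  | cons x xs ih =>
    simp only [List.foldl_cons, List.filter_cons]
    rw [ih]
    by_cases h : f x.2 = t
    · rw [h, PySem.Dict.getD_modify_self]
      simp
    · rw [PySem.Dict.getD_modify_of_ne _ _ _ (Ne.symm h)]
      simp [h]

lemma bucket_mem (f : String → String) (points : List String) (t : String) (j : Int) :
    j ∈ ((PySem.List.enumerate points).filter (fun jp => f jp.2 == t)).map (·.1)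
      ↔ ∃ (k : Nat) (h : k < points.length), j = (k : Int) ∧ f points[k] = t := by
  simp only [List.mem_map, List.mem_filter, PySem.List.mem_enumerate_iff]
  constructor
  · rintro ⟨jp, ⟨⟨k, hk, rfl⟩, ht⟩, rfl⟩
    exact ⟨k, hk, by simp, by simpa using ht⟩
  · rintro ⟨k, hk, rfl, ht⟩
    exact ⟨((k : Int), points[k]), ⟨⟨k, hk, by simp⟩, by simpa using ht⟩, rfl⟩


-- the value A places at cell (p, q)
def pvEntry (triples : List String) (p q : String) : Int :=
  if PySem.List.pyGetD (pvSplit p) 1 "" == PySem.List.pyGetD (pvSplit q) 0 "" then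
    if triples.contains (p ++ "|" ++ PySem.List.pyGetD (pvSplit q) 1 "") then 1 else 0
  else 0

lemma A_eq (points triples : List String) :
    generate_mask_matrix points triples
      = points.map (fun p => points.map (fun q => pvEntry triples p q)) := by
  unfold generate_mask_matrix
  have hinner : ∀ p : String,
      (PySem.List.pyRange 0 (PySem.List.len points)).foldl (fun w1 j =>
        if PySem.List.pyGetD (pvSplit p) 1 ""
             == PySem.List.pyGetD (pvSplit (PySem.List.pyGetD points j "")) 0 "" then
          if triples.contains (p ++ "|"
               ++ PySem.List.pyGetD (pvSplit (PySem.List.pyGetD points j "")) 1 "") then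
            w1 ++ [(1 : Int)]
          else
            w1 ++ [(0 : Int)]
        else
          w1 ++ [(0 : Int)]) []
        = points.map (fun q => pvEntry triples p q) := by
    intro p
    have h1 : ∀ (w1 : List Int) (j : Int),
        (if PySem.List.pyGetD (pvSplit p) 1 ""
             == PySem.List.pyGetD (pvSplit (PySem.List.pyGetD points j "")) 0 "" then
          if triples.contains (p ++ "|"
               ++ PySem.List.pyGetD (pvSplit (PySem.List.pyGetD points j "")) 1 "") then
            w1 ++ [(1 : Int)]
          else w1 ++ [(0 : Int)]
        else w1 ++ [(0 : Int)])
        = w1 ++ [pvEntry triples p (PySem.List.pyGetD points j "")] := by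
      intro w1 j; unfold pvEntry; split_ifs <;> rfl
    simp only [h1]
    rw [PySem.List.foldl_append_singleton_eq_map]
    rw [show (fun j => pvEntry triples p (PySem.List.pyGetD points j "")) = (fun q => pvEntry triples p q) ∘ (fun j => PySem.List.pyGetD points j "") from rfl,
        ← List.map_map, PySem.List.map_pyGetD_pyRange_zero]
    simp
  simp only [hinner]
  have h2 : ∀ (acc : List (List Int)),
      (PySem.List.pyRange 0 (PySem.List.len points)).foldl (fun weights i =>
        weights ++ [points.map (fun q => pvEntry triples (PySem.List.pyGetD points i "") q)]) acc
      = acc ++ points.map (fun p => points.map (fun q => pvEntry triples p q)) := by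
    intro acc
    rw [PySem.List.foldl_append_singleton_eq_map]
    rw [show (fun i => points.map (fun q => pvEntry triples (PySem.List.pyGetD points i "") q)) = (fun p => points.map (fun q => pvEntry triples p q)) ∘ (fun i => PySem.List.pyGetD points i "") from rfl,
        ← List.map_map, PySem.List.map_pyGetD_pyRange_zero]
  exact h2 []

lemma B_eq (points triples : List String) :
    generate_mask_matrix_alt points triples
      = points.map (fun p => points.map (fun q => pvEntry triples p q)) := by
  simp only [generate_mask_matrix_alt]
  have hbuckets : ∀ t : String,
      ((PySem.List.enumerate points).foldl (fun d jp =>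
          d.modify (PySem.List.pyGetD (pvSplit jp.2) 0 "") [] (· ++ [jp.1]))
        (PySem.Dict.empty : PySem.Dict String (List Int))).getD t []
      = ((PySem.List.enumerate points).filter
          (fun jp => PySem.List.pyGetD (pvSplit jp.2) 0 "" == t)).map (·.1) := by
    intro t
    rw [bucket_spec (fun s => PySem.List.pyGetD (pvSplit s) 0 "")]
    simp
  have hmem : ∀ (t : String) (j : Int),
      j ∈ ((PySem.List.enumerate points).filter
          (fun jp => PySem.List.pyGetD (pvSplit jp.2) 0 "" == t)).map (·.1)
        ↔ ∃ (k : Nat) (h : k < points.length), j = (k : Int)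
            ∧ PySem.List.pyGetD (pvSplit points[k]) 0 "" = t :=
    fun t j => bucket_mem (fun s => PySem.List.pyGetD (pvSplit s) 0 "") points t j
  have H := outer_eq
      (fun p => ((PySem.List.enumerate points).foldl (fun d jp =>
          d.modify (PySem.List.pyGetD (pvSplit jp.2) 0 "") [] (· ++ [jp.1]))
        (PySem.Dict.empty : PySem.Dict String (List Int))).getD
          (PySem.List.pyGetD (pvSplit p) 1 "") [])
      (fun p j => (PySem.Set.ofList triples).contains
          (p ++ "|" ++ PySem.List.pyGetD (pvSplit (PySem.List.pyGetD points j "")) 1 ""))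
      points 0 (List.replicate points.length (List.replicate points.length (0 : Int)))
      points.length (by simp) (by intro k hk; rw [List.getD_eq_getElem _ _ (by simpa using hk)]; simp)
      (by simp)
      (by intro p j hj
          simp only [hbuckets, hmem] at hj
          obtain ⟨k, hk, rfl, _⟩ := hj
          exact ⟨k, rfl, hk⟩)
  simp only [Nat.cast_zero] at H
  rw [H]
  apply List.ext_getElem
  · simp
  · intro k hk1 hk2
    have hkn : k < points.length := by simpa using hk2
    simp only [List.getElem_mapIdx, List.getElem_map, List.getElem_replicate]
    have hcond : 0 ≤ k ∧ k - 0 < points.length := ⟨Nat.zero_le _, by simpa using hkn⟩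
    rw [if_pos hcond]
    have hgd : points.getD (k - 0) "" = points[k] := by
      rw [Nat.sub_zero]; exact List.getD_eq_getElem _ _ hkn
    rw [hgd]
    apply List.ext_getElem
    · rw [rowF_length]; simp
    · intro j hj1 hj2
      have hjn : j < points.length := by simpa using hj2
      rw [rowFold_getElem _ _ _ _ (by simpa using hjn)
          (by intro x hx
              simp only [hbuckets, hmem] at hx
              obtain ⟨m, hm, rfl, _⟩ := hx
              exact Int.natCast_nonneg m)]
      rw [List.getElem_replicate, List.getElem_map]
      simp only [hbuckets, hmem]
      unfold pvEntry
      have hget : PySem.List.pyGetD points ((j : Nat) : Int) "" = points[j] := by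
        rw [PySem.List.pyGetD_natCast]
        exact List.getD_eq_getElem _ _ hjn
      by_cases hhead : PySem.List.pyGetD (pvSplit points[j]) 0 "" = PySem.List.pyGetD (pvSplit points[k]) 1 ""
      · have hmemj : ∃ (m : Nat) (h : m < points.length), (j : Int) = (m : Int)
            ∧ PySem.List.pyGetD (pvSplit points[m]) 0 "" = PySem.List.pyGetD (pvSplit points[k]) 1 "" :=
          ⟨j, hjn, rfl, hhead⟩
        have hbeq : (PySem.List.pyGetD (pvSplit points[k]) 1 "" == PySem.List.pyGetD (pvSplit points[j]) 0 "") = true := by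
          simp [hhead]
        rw [if_pos hbeq]
        by_cases hc : triples.contains (points[k] ++ "|" ++ PySem.List.pyGetD (pvSplit points[j]) 1 "") = true
        · rw [if_pos hc, if_pos]
          refine ⟨hmemj, ?_⟩
          rw [hget]
          simpa [PySem.Set.contains] using hc
        · rw [if_neg hc, if_neg]
          intro ⟨_, hcc⟩
          rw [hget] at hcc
          exact hc (by simpa [PySem.Set.contains] using hcc)
      · have hbeq : ¬ (PySem.List.pyGetD (pvSplit points[k]) 1 "" == PySem.List.pyGetD (pvSplit points[j]) 0 "") = true := by
          simpa using fun h => hhead h.symm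
        rw [if_neg hbeq, if_neg]
        rintro ⟨⟨m, hm, hjm, hh⟩, _⟩
        have : j = m := by exact_mod_cast hjm
        subst this
        exact hhead hh

-- ===== VERDICT (by name: the statement is the Claim_ definition above) =====
theorem generate_mask_matrix_spec : Claim_equal_generate_mask_matrix := by
  intro points triples _ _
  unfold Spec_generate_mask_matrix
  rw [A_eq, B_eq]
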